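-- pv_equiv track=rewrite | github.com/SamiFawcett/dm-bayes | full-bayes/fb.py | splitIntoClassDatasets
-- ===== SOURCE A (Python) =====
-- def splitIntoClassDatasets(point_view, response_column):
--     classes = [0, 1, 2, 3]
--     datasets = []
--     c0 = []
--     c1 = []
--     c2 = []
--     c3 = []
--
--     for i in range(0, len(response_column)):
--         if (response_column[i] == 0):
--             c0.append(point_view[i])
--         elif (response_column[i] == 1):
--             c1.append(point_view[i])
--         elif (response_column[i] == 2):
--             c2.append(point_view[i])
--         elif (response_column[i] == 3):
--             c3.append(point_view[i])
--     datasets.append(c0)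
--     datasets.append(c1)
--     datasets.append(c2)
--     datasets.append(c3)
--     return datasets
-- ===== SOURCE B (Python) =====
-- def splitIntoClassDatasets(point_view, response_column):
--     return [[point_view[i] for i in range(len(response_column)) if response_column[i] == c]
--             for c in [0, 1, 2, 3]]
-- ===== Notes on version B (the rewrite author's own statement) =====
-- stated objective: simpler
-- what changed: Replaces the single indexed pass threading four accumulator lists through four elif branches with four independent filtered comprehensions, one per class label.
import Mathlib
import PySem

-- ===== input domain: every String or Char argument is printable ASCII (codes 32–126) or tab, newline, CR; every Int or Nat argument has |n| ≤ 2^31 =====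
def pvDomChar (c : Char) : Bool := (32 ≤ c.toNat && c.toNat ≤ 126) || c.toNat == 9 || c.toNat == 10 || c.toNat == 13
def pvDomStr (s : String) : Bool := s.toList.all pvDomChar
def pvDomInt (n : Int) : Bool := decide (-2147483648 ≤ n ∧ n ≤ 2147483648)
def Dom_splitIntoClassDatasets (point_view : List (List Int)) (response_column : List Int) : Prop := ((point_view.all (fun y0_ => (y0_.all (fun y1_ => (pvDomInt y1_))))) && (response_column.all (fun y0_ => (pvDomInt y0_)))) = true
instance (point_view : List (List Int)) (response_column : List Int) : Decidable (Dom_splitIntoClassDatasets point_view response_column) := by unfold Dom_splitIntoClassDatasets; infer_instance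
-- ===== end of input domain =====

-- B replaces A's single indexed pass with four accumulators by four independent
-- filtered comprehensions, one per class label (objective: simpler).

-- ===== PORT A =====
-- one pass over range(len(response_column)); four branches append to c0..c3
def splitIntoClassDatasets (point_view : List (List Int)) (response_column : List Int) : List (List (List Int)) :=
  let s := (PySem.List.pyRange 0 (PySem.List.len response_column) 1).foldl
    (fun (st : List (List Int) × List (List Int) × List (List Int) × List (List Int)) i =>
      if PySem.List.pyGetD response_column i 0 = 0 then
        (st.1 ++ [PySem.List.pyGetD point_view i []], st.2.1, st.2.2.1, st.2.2.2)
      else if PySem.List.pyGetD response_column i 0 = 1 then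
        (st.1, st.2.1 ++ [PySem.List.pyGetD point_view i []], st.2.2.1, st.2.2.2)
      else if PySem.List.pyGetD response_column i 0 = 2 then
        (st.1, st.2.1, st.2.2.1 ++ [PySem.List.pyGetD point_view i []], st.2.2.2)
      else if PySem.List.pyGetD response_column i 0 = 3 then
        (st.1, st.2.1, st.2.2.1, st.2.2.2 ++ [PySem.List.pyGetD point_view i []])
      else st)
    ([], [], [], [])
  [s.1, s.2.1, s.2.2.1, s.2.2.2]

-- ===== PORT B =====
-- [[point_view[i] for i in range(len(response_column)) if response_column[i] == c] for c in [0,1,2,3]]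
def splitIntoClassDatasets_alt (point_view : List (List Int)) (response_column : List Int) : List (List (List Int)) :=
  [(0 : Int), 1, 2, 3].map (fun c =>
    ((PySem.List.pyRange 0 (PySem.List.len response_column) 1).filter
       (fun i => PySem.List.pyGetD response_column i 0 == c)).map
      (fun i => PySem.List.pyGetD point_view i []))

-- ===== PRECONDITION & SPEC =====
-- Pre_ excludes exactly the inputs where Python raises IndexError: an index i with
-- label 0..3 but i out of range of point_view (both A and B raise there).
def Pre_splitIntoClassDatasets (point_view : List (List Int)) (response_column : List Int) : Prop :=
  ∀ i : Nat, i < response_column.length →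
    (response_column.getD i 0 = 0 ∨ response_column.getD i 0 = 1 ∨
     response_column.getD i 0 = 2 ∨ response_column.getD i 0 = 3) →
    i < point_view.length
instance (point_view : List (List Int)) (response_column : List Int) : Decidable (Pre_splitIntoClassDatasets point_view response_column) := by unfold Pre_splitIntoClassDatasets; infer_instance

def pvWitness_splitIntoClassDatasets : List (List Int) × List Int := ([[1], [2], [3]], [0, 3, 5])

def Spec_splitIntoClassDatasets (point_view : List (List Int)) (response_column : List Int) (out : List (List (List Int))) : Prop := out = splitIntoClassDatasets_alt point_view response_column
instance (point_view : List (List Int)) (response_column : List Int) (out : List (List (List Int))) : Decidable (Spec_splitIntoClassDatasets point_view response_column out) := by unfold Spec_splitIntoClassDatasets; infer_instance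

-- ===== CLAIM (what is proved, stated in full; the proofs are below) =====
def Claim_equal_splitIntoClassDatasets : Prop := ∀ (point_view : List (List Int)) (response_column : List Int), Dom_splitIntoClassDatasets point_view response_column → Pre_splitIntoClassDatasets point_view response_column → Spec_splitIntoClassDatasets point_view response_column (splitIntoClassDatasets point_view response_column)

-- ===== LEMMAS AND PROOFS =====

-- the per-class bucket B builds
def pvBucket (point_view : List (List Int)) (response_column : List Int) (c : Int) (l : List Int) : List (List Int) :=
  (l.filter (fun i => PySem.List.pyGetD response_column i 0 == c)).map
    (fun i => PySem.List.pyGetD point_view i [])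

-- A's fold over any index list equals the four buckets appended to the accumulators
lemma splitFold_eq (pv : List (List Int)) (rc : List Int) (l : List Int)
    (a b c d : List (List Int)) :
    l.foldl
      (fun (st : List (List Int) × List (List Int) × List (List Int) × List (List Int)) i =>
        if PySem.List.pyGetD rc i 0 = 0 then
          (st.1 ++ [PySem.List.pyGetD pv i []], st.2.1, st.2.2.1, st.2.2.2)
        else if PySem.List.pyGetD rc i 0 = 1 then
          (st.1, st.2.1 ++ [PySem.List.pyGetD pv i []], st.2.2.1, st.2.2.2)
        else if PySem.List.pyGetD rc i 0 = 2 then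
          (st.1, st.2.1, st.2.2.1 ++ [PySem.List.pyGetD pv i []], st.2.2.2)
        else if PySem.List.pyGetD rc i 0 = 3 then
          (st.1, st.2.1, st.2.2.1, st.2.2.2 ++ [PySem.List.pyGetD pv i []])
        else st)
      (a, b, c, d)
    = (a ++ pvBucket pv rc 0 l, b ++ pvBucket pv rc 1 l,
       c ++ pvBucket pv rc 2 l, d ++ pvBucket pv rc 3 l) := by
  induction l generalizing a b c d with
  | nil => simp [pvBucket]
  | cons x l ih =>
    simp only [List.foldl_cons]
    by_cases h0 : PySem.List.pyGetD rc x 0 = 0 <;>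
      [skip; by_cases h1 : PySem.List.pyGetD rc x 0 = 1] <;>
      [skip; skip; by_cases h2 : PySem.List.pyGetD rc x 0 = 2] <;>
      [skip; skip; skip; by_cases h3 : PySem.List.pyGetD rc x 0 = 3] <;>
      simp [*, pvBucket, List.filter_cons]

-- ===== VERDICT (by name: the statement is the Claim_ definition above) =====
theorem splitIntoClassDatasets_spec : Claim_equal_splitIntoClassDatasets := by
  intro pv rc _ _
  unfold Spec_splitIntoClassDatasets splitIntoClassDatasets splitIntoClassDatasets_alt
  rw [splitFold_eq]
  simp [pvBucket]
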